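-- pv_equiv track=rewrite | github.com/jpenalozay/tesis2 | agentes/implementations/coder_agent_v3.py | _find_main_file
-- ===== SOURCE A (Python) =====
-- from typing import Dict, Any, Optional
--
-- def _find_main_file(files: Dict[str, str]) -> Optional[str]:
--     """Encuentra archivo principal para ejecutar."""
--     # Prioridad: main.py, app.py, __main__.py, primer .py
--     priorities = ["main.py", "app.py", "__main__.py"]
--
--     for priority in priorities:
--         for filepath in files.keys():
--             if filepath.endswith(priority):
--                 return filepath
--
--     # Si no hay prioridad, tomar primer .py
--     for filepath in files.keys():
--         if filepath.endswith(".py"):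
--             return filepath
--
--     return None
-- ===== SOURCE B (Python) =====
-- def _find_main_file(files):
--     """Encuentra archivo principal para ejecutar."""
--     best = None  # (rank, path): smallest rank wins, first seen wins ties
--     for path in files:
--         if path.endswith("main.py"):
--             r = 0
--         elif path.endswith("app.py"):
--             r = 1
--         elif path.endswith("__main__.py"):
--             r = 2
--         elif path.endswith(".py"):
--             r = 3
--         else:
--             continue
--         if best is None or r < best[0]:
--             best = (r, path)
--     return best[1] if best is not None else None
-- ===== Notes on version B (the rewrite author's own statement) =====
-- stated objective: alternative
-- what changed: Replaces A's three full priority scans plus a final .py scan with a single best-so-far pass that ranks each path by suffix priority and keeps the minimum rank, first seen on ties.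
import Mathlib
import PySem

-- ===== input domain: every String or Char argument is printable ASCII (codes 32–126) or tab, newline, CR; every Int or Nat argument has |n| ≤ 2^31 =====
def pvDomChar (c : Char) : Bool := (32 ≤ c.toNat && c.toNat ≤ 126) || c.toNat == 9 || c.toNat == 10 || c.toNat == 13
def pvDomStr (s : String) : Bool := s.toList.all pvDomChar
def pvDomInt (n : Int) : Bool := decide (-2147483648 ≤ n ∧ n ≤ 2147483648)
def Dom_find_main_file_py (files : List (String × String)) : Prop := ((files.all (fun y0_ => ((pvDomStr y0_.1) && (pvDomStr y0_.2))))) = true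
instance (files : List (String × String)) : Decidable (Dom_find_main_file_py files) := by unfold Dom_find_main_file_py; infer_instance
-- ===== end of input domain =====

-- B replaces A's three full priority scans plus a final ".py" scan with one best-so-far pass
-- keeping the minimum suffix-priority rank (first seen wins ties); objective: alternative.

-- ===== PORT A =====
-- A: for each priority suffix in order, scan all keys; then a final scan for ".py".
def find_main_file_py (files : List (String × String)) : Option String :=
  let ks := (PySem.Dict.ofList files).keys
  let priorities : List String := ["main.py", "app.py", "__main__.py"]
  match priorities.findSome? (fun pr => ks.find? (fun fp => PySem.Str.endswith fp pr)) with
  | some fp => some fp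
  | none => ks.find? (fun fp => PySem.Str.endswith fp ".py")

-- ===== PORT B =====
-- rank of a path by suffix priority (none = not a .py file), as in Source B's if/elif chain
def pvRank (p : String) : Option Nat :=
  if PySem.Str.endswith p "main.py" then some 0
  else if PySem.Str.endswith p "app.py" then some 1
  else if PySem.Str.endswith p "__main__.py" then some 2
  else if PySem.Str.endswith p ".py" then some 3
  else none

-- the single best-so-far pass of Source B: best = (rank, path), strictly smaller rank replaces
def pvBestLoop : List String → Option (Nat × String) → Option (Nat × String)
  | [], best => best
  | p :: rest, best =>
      pvBestLoop rest
        (match pvRank p with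
         | none => best
         | some r =>
           match best with
           | none => some (r, p)
           | some (rb, b) => if r < rb then some (r, p) else some (rb, b))

def find_main_file_py_alt (files : List (String × String)) : Option String :=
  match pvBestLoop (PySem.Dict.ofList files).keys none with
  | some (_, p) => some p
  | none => none

-- ===== PRECONDITION & SPEC =====
def Spec_find_main_file_py (files : List (String × String)) (out : Option String) : Prop := out = find_main_file_py_alt files
instance (files : List (String × String)) (out : Option String) : Decidable (Spec_find_main_file_py files out) := by unfold Spec_find_main_file_py; infer_instance

-- ===== CLAIM (what is proved, stated in full; the proofs are below) =====
def Claim_equal_find_main_file_py : Prop := ∀ (files : List (String × String)), Dom_find_main_file_py files → Spec_find_main_file_py files (find_main_file_py files)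

-- ===== LEMMAS AND PROOFS =====

-- merge of two best-so-far states (left = seen earlier, wins ties)
def pvMerge : Option (Nat × String) → Option (Nat × String) → Option (Nat × String)
  | none, y => y
  | some x, none => some x
  | some (rb, b), some (r, q) => if r < rb then some (r, q) else some (rb, b)

theorem pvMerge_assoc (x y z : Option (Nat × String)) :
    pvMerge (pvMerge x y) z = pvMerge x (pvMerge y z) := by
  have hnr : ∀ w, pvMerge w none = w := fun w => by rcases w with _ | ⟨a, b⟩ <;> rfl
  rcases x with _ | ⟨rx, x⟩
  · rfl
  rcases y with _ | ⟨ry, y⟩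
  · rw [hnr]; rfl
  rcases z with _ | ⟨rz, z⟩
  · rw [hnr, hnr]
  · simp only [pvMerge]
    by_cases h1 : ry < rx <;> by_cases h2 : rz < ry <;> by_cases h3 : rz < rx <;>
      first | (exfalso; omega) | simp [pvMerge, h1, h2, h3]

theorem pvBestLoop_merge (ks : List String) (best : Option (Nat × String)) :
    pvBestLoop ks best = pvMerge best (pvBestLoop ks none) := by
  induction ks generalizing best with
  | nil => cases best <;> rfl
  | cons p rest ih =>
    rcases h : pvRank p with _ | r <;> simp only [pvBestLoop, h]
    · exact ih best
    · have hstep : ∀ b : Option (Nat × String),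
          (match b with
           | none => some (r, p)
           | some (rb, b') => if r < rb then some (r, p) else some (rb, b')) =
          pvMerge b (some (r, p)) := by
        intro b; rcases b with _ | ⟨rb, b'⟩ <;> rfl
      rw [hstep, ih, ih (some (r, p)), pvMerge_assoc]

theorem pvBestLoop_cons (p : String) (ks : List String) :
    pvBestLoop (p :: ks) none =
      pvMerge ((pvRank p).map (fun r => (r, p))) (pvBestLoop ks none) := by
  rcases h : pvRank p with _ | r <;> simp only [pvBestLoop, h]
  · simp [pvMerge]
  · simpa [pvMerge] using pvBestLoop_merge ks (some (r, p))

theorem pvBest_none (ks : List String) (h : pvBestLoop ks none = none) :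
    ∀ p ∈ ks, pvRank p = none := by
  induction ks with
  | nil => simp
  | cons p rest ih =>
    rw [pvBestLoop_cons] at h
    intro x hx
    rcases hp : pvRank p with _ | rp
    · rw [hp] at h
      simp only [Option.map_none, pvMerge] at h
      rcases List.mem_cons.1 hx with rfl | hx'
      · exact hp
      · exact ih h x hx'
    · rw [hp] at h
      simp only [Option.map_some] at h
      rcases hb : pvBestLoop rest none with _ | ⟨rb, b⟩ <;> rw [hb] at h <;>
          simp_all [pvMerge]
      split_ifs at h

theorem pvBest_mem (ks : List String) (r : Nat) (q : String)
    (h : pvBestLoop ks none = some (r, q)) : q ∈ ks ∧ pvRank q = some r := by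
  induction ks generalizing r q with
  | nil => simp [pvBestLoop] at h
  | cons p rest ih =>
    rw [pvBestLoop_cons] at h
    rcases hp : pvRank p with _ | rp
    · rw [hp] at h
      simp only [Option.map_none, pvMerge] at h
      obtain ⟨h1, h2⟩ := ih r q h
      exact ⟨List.mem_cons_of_mem _ h1, h2⟩
    · rw [hp] at h
      simp only [Option.map_some] at h
      rcases hb : pvBestLoop rest none with _ | ⟨rb, b⟩ <;> rw [hb] at h <;>
          simp only [pvMerge] at h
      · simp only [Option.some.injEq, Prod.mk.injEq] at h
        obtain ⟨rfl, rfl⟩ := h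
        exact ⟨List.mem_cons_self, hp⟩
      · split_ifs at h <;>
          (simp only [Option.some.injEq, Prod.mk.injEq] at h; obtain ⟨rfl, rfl⟩ := h)
        · exact ⟨List.mem_cons_of_mem _ (ih _ _ hb).1, (ih _ _ hb).2⟩
        · exact ⟨List.mem_cons_self, hp⟩

theorem pvBest_min (ks : List String) (r : Nat) (q : String)
    (h : pvBestLoop ks none = some (r, q)) :
    ∀ p ∈ ks, ∀ rp, pvRank p = some rp → r ≤ rp := by
  induction ks generalizing r q with
  | nil => simp
  | cons p rest ih =>
    rw [pvBestLoop_cons] at h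
    intro x hx rx hrx
    rcases hp : pvRank p with _ | rp
    · rw [hp] at h
      simp only [Option.map_none, pvMerge] at h
      rcases List.mem_cons.1 hx with rfl | hx'
      · rw [hp] at hrx; cases hrx
      · exact ih r q h x hx' rx hrx
    · rw [hp] at h
      simp only [Option.map_some] at h
      rcases hb : pvBestLoop rest none with _ | ⟨rb, b⟩ <;> rw [hb] at h <;>
          simp only [pvMerge] at h
      · simp only [Option.some.injEq, Prod.mk.injEq] at h
        obtain ⟨rfl, rfl⟩ := h
        rcases List.mem_cons.1 hx with rfl | hx'
        · rw [hp] at hrx; cases hrx; omega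
        · rw [pvBest_none rest hb x hx'] at hrx; cases hrx
      · split_ifs at h with hlt <;>
          (simp only [Option.some.injEq, Prod.mk.injEq] at h; obtain ⟨rfl, rfl⟩ := h)
        · rcases List.mem_cons.1 hx with rfl | hx'
          · rw [hp] at hrx; cases hrx; omega
          · exact ih _ _ hb x hx' rx hrx
        · rcases List.mem_cons.1 hx with rfl | hx'
          · rw [hp] at hrx; cases hrx; omega
          · have := ih _ _ hb x hx' rx hrx; omega

-- find? only looks at members: congruence under pointwise equality on the list
theorem pv_find_congr {α : Type} (ks : List α) (f g : α → Bool)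
    (h : ∀ x ∈ ks, f x = g x) : ks.find? f = ks.find? g := by
  induction ks with
  | nil => rfl
  | cons p rest ih =>
    simp only [List.find?_cons]
    rw [h p List.mem_cons_self, ih (fun x hx => h x (List.mem_cons_of_mem _ hx))]

-- core: under "no member has rank below k", a scan for the rank-k test returns
-- B's best-so-far result exactly when its rank is k
theorem pvFind_rank (ks : List String) (k : Nat)
    (h : ∀ p ∈ ks, ∀ j, pvRank p = some j → k ≤ j) :
    ks.find? (fun p => pvRank p == some k) =
      (pvBestLoop ks none).bind (fun x => if x.1 = k then some x.2 else none) := by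
  induction ks with
  | nil => rfl
  | cons p rest ih =>
    have hrest : ∀ p ∈ rest, ∀ j, pvRank p = some j → k ≤ j :=
      fun x hx => h x (List.mem_cons_of_mem _ hx)
    rw [pvBestLoop_cons]
    rcases hp : pvRank p with _ | rp
    · rw [List.find?_cons_of_neg (by simp [hp])]
      simp only [Option.map_none, pvMerge]
      exact ih hrest
    · have hk : k ≤ rp := h p List.mem_cons_self rp hp
      by_cases hek : rp = k
      · subst hek
        rw [List.find?_cons_of_pos (by simp [hp])]
        rcases hb : pvBestLoop rest none with _ | ⟨rb, b⟩
        · simp [pvMerge]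
        · have hrb : rp ≤ rb := by
            obtain ⟨hmem, hrank⟩ := pvBest_mem rest rb b hb
            exact hrest b hmem rb hrank
          simp only [Option.map_some, pvMerge]
          rw [if_neg (by omega)]
          simp
      · rw [List.find?_cons_of_neg (by simp [hp, hek]), ih hrest]
        rcases hb : pvBestLoop rest none with _ | ⟨rb, b⟩
        · simp [pvMerge, hek]
        · simp only [Option.map_some, pvMerge]
          obtain ⟨hmem, hrank⟩ := pvBest_mem rest rb b hb
          have hkb : k ≤ rb := hrest b hmem rb hrank
          by_cases hcmp : rb < rp
          · rw [if_pos hcmp]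
          · rw [if_neg hcmp]
            have hbk : rb ≠ k := by omega
            simp [hek, hbk]

theorem pvRank_le3 (p : String) (r : Nat) (h : pvRank p = some r) : r ≤ 3 := by
  unfold pvRank at h
  split_ifs at h <;> simp_all <;> omega

theorem pv_none_all (p : String) (h : pvRank p = none) :
    PySem.Str.endswith p "main.py" = false ∧ PySem.Str.endswith p "app.py" = false ∧
    PySem.Str.endswith p "__main__.py" = false ∧ PySem.Str.endswith p ".py" = false := by
  unfold pvRank at h
  split_ifs at h
  simp_all

theorem pv_e0_iff (p : String) :
    PySem.Str.endswith p "main.py" = (pvRank p == some 0) := by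
  unfold pvRank; split_ifs <;> simp_all

theorem pv_e1_iff (p : String) (h0 : pvRank p ≠ some 0) :
    PySem.Str.endswith p "app.py" = (pvRank p == some 1) := by
  unfold pvRank at *; split_ifs at * <;> simp_all

theorem pv_e2_iff (p : String) (h0 : pvRank p ≠ some 0) (h1 : pvRank p ≠ some 1) :
    PySem.Str.endswith p "__main__.py" = (pvRank p == some 2) := by
  unfold pvRank at *; split_ifs at * <;> simp_all

theorem pv_e3_iff (p : String) (h0 : pvRank p ≠ some 0) (h1 : pvRank p ≠ some 1)
    (h2 : pvRank p ≠ some 2) :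
    PySem.Str.endswith p ".py" = (pvRank p == some 3) := by
  unfold pvRank at *; split_ifs at * <;> simp_all

-- the whole A-side scan chain against the whole B-side pass, over any key list
theorem pv_core (ks : List String) :
    (match (["main.py", "app.py", "__main__.py"] : List String).findSome?
        (fun pr => ks.find? (fun fp => PySem.Str.endswith fp pr)) with
     | some fp => some fp
     | none => ks.find? (fun fp => PySem.Str.endswith fp ".py")) =
    (match pvBestLoop ks none with
     | some (_, p) => some p
     | none => none) := by
  simp only [List.findSome?_cons, List.findSome?_nil]
  rcases hb : pvBestLoop ks none with _ | ⟨r, q⟩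
  · have hall := pvBest_none ks hb
    have f0 : ks.find? (fun fp => PySem.Str.endswith fp "main.py") = none :=
      List.find?_eq_none.2 (fun x hx => by simpa using (pv_none_all x (hall x hx)).1)
    have f1 : ks.find? (fun fp => PySem.Str.endswith fp "app.py") = none :=
      List.find?_eq_none.2 (fun x hx => by simpa using (pv_none_all x (hall x hx)).2.1)
    have f2 : ks.find? (fun fp => PySem.Str.endswith fp "__main__.py") = none :=
      List.find?_eq_none.2 (fun x hx => by simpa using (pv_none_all x (hall x hx)).2.2.1)
    have f3 : ks.find? (fun fp => PySem.Str.endswith fp ".py") = none :=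
      List.find?_eq_none.2 (fun x hx => by simpa using (pv_none_all x (hall x hx)).2.2.2)
    rw [f0, f1, f2, f3]
  · obtain ⟨hmem, hrank⟩ := pvBest_mem ks r q hb
    have hmin := pvBest_min ks r q hb
    have hr3 : r ≤ 3 := pvRank_le3 q r hrank
    have g0 : ks.find? (fun fp => PySem.Str.endswith fp "main.py") =
        (pvBestLoop ks none).bind (fun x => if x.1 = 0 then some x.2 else none) := by
      rw [pv_find_congr _ _ _ (fun p _ => pv_e0_iff p)]
      exact pvFind_rank ks 0 (fun p hp j hj => Nat.zero_le j)
    interval_cases r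
    · rw [g0, hb]; simp
    · have h1 : ∀ p ∈ ks, ∀ j, pvRank p = some j → 1 ≤ j := hmin
      have g1 : ks.find? (fun fp => PySem.Str.endswith fp "app.py") =
          (pvBestLoop ks none).bind (fun x => if x.1 = 1 then some x.2 else none) := by
        rw [pv_find_congr _ _ _ (fun p hp =>
          pv_e1_iff p (fun hc => by have := h1 p hp 0 hc; omega))]
        exact pvFind_rank ks 1 h1
      rw [g0, g1, hb]; simp
    · have h1 : ∀ p ∈ ks, ∀ j, pvRank p = some j → 1 ≤ j :=
        fun p hp j hj => le_trans (by omega) (hmin p hp j hj)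
      have h2 : ∀ p ∈ ks, ∀ j, pvRank p = some j → 2 ≤ j := hmin
      have g1 : ks.find? (fun fp => PySem.Str.endswith fp "app.py") =
          (pvBestLoop ks none).bind (fun x => if x.1 = 1 then some x.2 else none) := by
        rw [pv_find_congr _ _ _ (fun p hp =>
          pv_e1_iff p (fun hc => by have := h2 p hp 0 hc; omega))]
        exact pvFind_rank ks 1 h1
      have g2 : ks.find? (fun fp => PySem.Str.endswith fp "__main__.py") =
          (pvBestLoop ks none).bind (fun x => if x.1 = 2 then some x.2 else none) := by
        rw [pv_find_congr _ _ _ (fun p hp =>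
          pv_e2_iff p (fun hc => by have := h2 p hp 0 hc; omega)
            (fun hc => by have := h2 p hp 1 hc; omega))]
        exact pvFind_rank ks 2 h2
      rw [g0, g1, g2, hb]; simp
    · have h1 : ∀ p ∈ ks, ∀ j, pvRank p = some j → 1 ≤ j :=
        fun p hp j hj => le_trans (by omega) (hmin p hp j hj)
      have h2 : ∀ p ∈ ks, ∀ j, pvRank p = some j → 2 ≤ j :=
        fun p hp j hj => le_trans (by omega) (hmin p hp j hj)
      have h3 : ∀ p ∈ ks, ∀ j, pvRank p = some j → 3 ≤ j := hmin
      have g1 : ks.find? (fun fp => PySem.Str.endswith fp "app.py") =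
          (pvBestLoop ks none).bind (fun x => if x.1 = 1 then some x.2 else none) := by
        rw [pv_find_congr _ _ _ (fun p hp =>
          pv_e1_iff p (fun hc => by have := h3 p hp 0 hc; omega))]
        exact pvFind_rank ks 1 h1
      have g2 : ks.find? (fun fp => PySem.Str.endswith fp "__main__.py") =
          (pvBestLoop ks none).bind (fun x => if x.1 = 2 then some x.2 else none) := by
        rw [pv_find_congr _ _ _ (fun p hp =>
          pv_e2_iff p (fun hc => by have := h3 p hp 0 hc; omega)
            (fun hc => by have := h3 p hp 1 hc; omega))]
        exact pvFind_rank ks 2 h2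
      have g3 : ks.find? (fun fp => PySem.Str.endswith fp ".py") =
          (pvBestLoop ks none).bind (fun x => if x.1 = 3 then some x.2 else none) := by
        rw [pv_find_congr _ _ _ (fun p hp =>
          pv_e3_iff p (fun hc => by have := h3 p hp 0 hc; omega)
            (fun hc => by have := h3 p hp 1 hc; omega)
            (fun hc => by have := h3 p hp 2 hc; omega))]
        exact pvFind_rank ks 3 h3
      rw [g0, g1, g2, g3, hb]; simp

-- ===== VERDICT (by name: the statement is the Claim_ definition above) =====
theorem find_main_file_py_spec : Claim_equal_find_main_file_py := by
  intro files _
  unfold Spec_find_main_file_py find_main_file_py find_main_file_py_alt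
  exact pv_core _
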